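-- pv_equiv track=rewrite | github.com/francis-ohara/coding-practice | codesignal/3_gswep_assessment.py | solution
-- ===== SOURCE A (Python) =====
-- def solution(message, n):
--     consonants = "bcdfghjklmnpqrstvwxyz"
--     consonant_counter = 0
--
--     for i in range(len(message)):
--         if message[i].lower() in consonants:
--             consonant_counter += 1
--             if consonant_counter % n == 0:
--                 if message[i].lower() == "z":
--                     replacement = "b" if message[i].islower() else "B"
--                 elif message[i].islower():
--                     replacement = consonants[consonants.index(message[i]) + 1]
--                 else:
--                     replacement = consonants[consonants.index(message[i].lower()) + 1].upper()
--                 message = message[:i] + replacement + message[i+1:]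
--
--     return message
-- ===== SOURCE B (Python) =====
-- def solution(message, n):
--     consonants = "bcdfghjklmnpqrstvwxyz"
--     positions = [i for i, c in enumerate(message) if c.lower() in consonants]
--     chars = list(message)
--     for rank, i in enumerate(positions):
--         if (rank + 1) % n == 0:
--             c = message[i]
--             low = c.lower()
--             rep = "b" if low == "z" else consonants[consonants.index(low) + 1]
--             chars[i] = rep if c.islower() else rep.upper()
--     return "".join(chars)
-- ===== Notes on version B (the rewrite author's own statement) =====
-- stated objective: alternative
-- what changed: B first collects the consonant positions in one pass, then assigns the next-consonant replacement (shared z-wrap/case logic) at every n-th position into a char list and joins it, instead of A's single loop that rebuilds the whole string by slicing at each replacement.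
import Mathlib
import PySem

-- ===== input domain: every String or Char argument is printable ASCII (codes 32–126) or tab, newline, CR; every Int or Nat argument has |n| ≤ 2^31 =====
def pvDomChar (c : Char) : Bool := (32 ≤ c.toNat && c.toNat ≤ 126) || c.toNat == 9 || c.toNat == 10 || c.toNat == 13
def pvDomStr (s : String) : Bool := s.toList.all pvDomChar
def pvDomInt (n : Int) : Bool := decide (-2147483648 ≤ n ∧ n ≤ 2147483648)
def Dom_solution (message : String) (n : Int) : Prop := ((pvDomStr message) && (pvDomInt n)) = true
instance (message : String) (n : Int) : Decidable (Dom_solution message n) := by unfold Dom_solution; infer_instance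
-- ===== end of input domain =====

-- B replaces every n-th consonant in one indexed second pass over a precomputed consonant-position
-- list instead of A's repeated string re-concatenation; equal return value, no speed claim.

-- shared constant: the consonant string both Pythons use
def pvCons : List Char := "bcdfghjklmnpqrstvwxyz".toList
-- shared helper: `c.lower() in consonants` (both Pythons perform this test)
def pvIsCons (c : Char) : Bool := pvCons.contains (PySem.Chars.lowerChar c)

-- ===== PORT A =====
-- one loop step of A: at index i, read the current message, maybe replace the char at i by slicing
def pvStepA (n : Int) (st : List Char × Int) (i : Int) : List Char × Int :=
  match PySem.List.pyGet? st.1 i with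
  | none => st          -- dead: i is always in range (A's rebuild keeps the length)
  | some ch =>
    if pvIsCons ch then
      let cnt := st.2 + 1
      if PySem.Int.mod cnt n = 0 then
        let repl : Char :=
          if PySem.Chars.lowerChar ch = 'z' then
            (if PySem.Chars.islower ch then 'b' else 'B')
          else if PySem.Chars.islower ch then
            match PySem.List.index? pvCons ch with
            | some idx => PySem.List.pyGetD pvCons ((idx : Int) + 1) ch   -- index in range: ch is a consonant ≠ 'z'
            | none => ch                                                  -- dead: ch ∈ consonants
          else
            match PySem.List.index? pvCons (PySem.Chars.lowerChar ch) with
            | some idx => PySem.Chars.upperChar (PySem.List.pyGetD pvCons ((idx : Int) + 1) ch)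
            | none => ch                                                  -- dead
        (PySem.List.slice st.1 none (some i) ++ [repl] ++ PySem.List.slice st.1 (some (i + 1)) none, cnt)
      else (st.1, cnt)
    else st

def solution (message : String) (n : Int) : String :=
  String.ofList
    ((PySem.List.pyRange 0 (message.toList.length : Int) 1).foldl (pvStepA n) (message.toList, 0)).1

-- ===== PORT B =====
-- B's replacement of one consonant char: lowercase successor (z→b), re-uppercased if needed
def pvReplB (c : Char) : Char :=
  let low := PySem.Chars.lowerChar c
  let rep : Char :=
    if low = 'z' then 'b'
    else match PySem.List.index? pvCons low with
      | some idx => PySem.List.pyGetD pvCons ((idx : Int) + 1) low   -- index in range: low is a consonant ≠ 'z'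
      | none => low                                                  -- dead: low ∈ consonants
  if PySem.Chars.islower c then rep else PySem.Chars.upperChar rep

def solution_alt (message : String) (n : Int) : String :=
  -- first pass: positions of all consonants; second pass: assign replacements at every n-th one
  String.ofList
    ((PySem.List.enumerate
        ((PySem.List.enumerate message.toList 0).filterMap
          (fun p => if pvIsCons p.2 then some p.1 else none)) 0).foldl
      (fun acc ri =>
        if PySem.Int.mod (ri.1 + 1) n = 0 then
          acc.set ri.2.toNat (pvReplB (PySem.List.pyGetD message.toList ri.2 ' '))   -- index in range by construction
        else acc)
      message.toList)

-- ===== PRECONDITION & SPEC =====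
-- Pre_ excludes exactly the inputs where Python A raises ZeroDivisionError:
-- n = 0 while the message contains at least one consonant (B raises there too).
def Pre_solution (message : String) (n : Int) : Prop :=
  n ≠ 0 ∨ message.toList.all (fun c => !pvIsCons c) = true
instance (message : String) (n : Int) : Decidable (Pre_solution message n) := by
  unfold Pre_solution; infer_instance

def pvWitness_solution : String × Int := ("Hello world", 2)

def Spec_solution (message : String) (n : Int) (out : String) : Prop := out = solution_alt message n
instance (message : String) (n : Int) (out : String) : Decidable (Spec_solution message n out) := by
  unfold Spec_solution; infer_instance

-- ===== CLAIM (what is proved, stated in full; the proofs are below) =====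
def Claim_equal_solution : Prop := ∀ (message : String) (n : Int), Dom_solution message n → Pre_solution message n → Spec_solution message n (solution message n)

-- ===== LEMMAS AND PROOFS =====

-- canonical per-suffix description of the replacement process, used to relate both ports
def pvGo (n : Int) : List Char → Int → List Char
  | [], _ => []
  | c :: cs, cnt =>
    if pvIsCons c then
      (if PySem.Int.mod (cnt + 1) n = 0 then pvReplB c else c) :: pvGo n cs (cnt + 1)
    else c :: pvGo n cs cnt

theorem pv_lower_of_islower (c : Char) (h : PySem.Chars.islower c = true) :
    PySem.Chars.lowerChar c = c := by
  simp [PySem.Chars.islower] at h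
  simp [PySem.Chars.lowerChar, PySem.Chars.isupper]
  intro _ h2
  exact absurd (h.1.trans h2) (by decide)

theorem pv_replA_eq_replB (c : Char) (h : pvIsCons c = true) :
    (if PySem.Chars.lowerChar c = 'z' then
        (if PySem.Chars.islower c then 'b' else 'B')
      else if PySem.Chars.islower c then
        match PySem.List.index? pvCons c with
        | some idx => PySem.List.pyGetD pvCons ((idx : Int) + 1) c
        | none => c
      else
        match PySem.List.index? pvCons (PySem.Chars.lowerChar c) with
        | some idx => PySem.Chars.upperChar (PySem.List.pyGetD pvCons ((idx : Int) + 1) c)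
        | none => c) = pvReplB c := by
  unfold pvReplB
  by_cases hl : PySem.Chars.islower c = true
  · rw [pv_lower_of_islower c hl] at *
    by_cases hz : c = 'z'
    · subst hz; simp [hl]
    · simp [hl, hz]
  · simp only [hl]
    have hmem : PySem.Chars.lowerChar c ∈ pvCons := by
      unfold pvIsCons at h
      simpa using h
    have hs : (PySem.List.index? pvCons (PySem.Chars.lowerChar c)).isSome = true :=
      (PySem.List.index?_isSome_iff _ _).mpr hmem
    by_cases hz : PySem.Chars.lowerChar c = 'z'
    · simp [hz]
      decide
    · obtain ⟨idx, hidx⟩ := Option.isSome_iff_exists.mp hs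
      obtain ⟨hk, hval, -⟩ := PySem.List.getElem_of_index?_eq_some hidx
      have hlen : pvCons.length = 21 := by decide
      have hne : idx + 1 < pvCons.length := by
        by_contra hge
        have h20 : idx = 20 := by omega
        subst h20
        have hz20 : pvCons.getD 20 ' ' = 'z' := by decide
        rw [List.getD_eq_getElem _ _ (by omega)] at hz20
        exact hz (hval ▸ hz20)
      simp only [hz, if_false, hidx]
      have hcast : (idx : Int) + 1 = ((idx + 1 : Nat) : Int) := by push_cast; ring
      rw [hcast, PySem.List.pyGetD_natCast, PySem.List.pyGetD_natCast]
      rw [List.getD_eq_getElem _ _ hne, List.getD_eq_getElem _ _ hne]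
      simp

theorem pvA_fold (n : Int) (s : List Char) :
    ∀ (q : List Char) (cnt : Int),
      (PySem.List.pyRange (q.length : Int) ((q.length : Int) + (s.length : Int)) 1).foldl
          (pvStepA n) (q ++ s, cnt)
        = (q ++ pvGo n s cnt, cnt + (s.countP pvIsCons : Int)) := by
  induction s with
  | nil =>
    intro q cnt
    rw [PySem.List.pyRange_one_eq_nil (by simp)]
    simp [pvGo]
  | cons c cs ih =>
    intro q cnt
    have hlt : (q.length : Int) < (q.length : Int) + ((c :: cs).length : Int) := by
      simp only [List.length_cons]; push_cast; omega
    rw [PySem.List.pyRange_one_cons hlt]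
    simp only [List.foldl_cons]
    have elen : ∀ x : Char, ((q ++ [x]).length : Int) = (q.length : Int) + 1 := by
      intro x; simp
    have h0 : (0 : Int) ≤ (q.length : Int) := by omega
    have h1 : (0 : Int) ≤ (q.length : Int) + 1 := by omega
    have hget : PySem.List.pyGet? (q ++ c :: cs) (q.length : Int) = some c := by
      rw [PySem.List.pyGet?_natCast]; simp
    have hsliceL : PySem.List.slice (q ++ c :: cs) none (some (q.length : Int)) = q := by
      rw [PySem.List.slice_to _ h0]; simp
    have hsliceR : PySem.List.slice (q ++ c :: cs) (some ((q.length : Int) + 1)) none = cs := by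
      rw [PySem.List.slice_from _ h1]
      have ht : ((q.length : Int) + 1).toNat = (q ++ [c]).length := by
        simp only [List.length_append, List.length_cons, List.length_nil]; omega
      rw [ht, show q ++ c :: cs = (q ++ [c]) ++ cs from by simp, List.drop_left]
    have hstop :
        (q.length : Int) + ((c :: cs).length : Int)
          = ((q ++ [c]).length : Int) + (cs.length : Int) := by
      push_cast [List.length_append, List.length_cons, List.length_nil]; ring
    by_cases hc : pvIsCons c = true
    · by_cases hm : PySem.Int.mod (cnt + 1) n = 0
      · have hstep :
            pvStepA n (q ++ c :: cs, cnt) (q.length : Int)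
              = ((q ++ [pvReplB c]) ++ cs, cnt + 1) := by
          simp only [pvStepA, hget, hc, if_true, hm, hsliceL, hsliceR]
          rw [pv_replA_eq_replB c hc]
        rw [hstep, hstop, show (q.length : Int) + 1 = ((q ++ [pvReplB c]).length : Int) from (elen _).symm,
            show ((q ++ [c]).length : Int) = ((q ++ [pvReplB c]).length : Int) from by simp,
            ih (q ++ [pvReplB c]) (cnt + 1)]
        simp only [pvGo, hc, if_true, hm, List.countP_cons, Prod.mk.injEq]
        constructor
        · simp
        · push_cast; ring
      · have hstep :
            pvStepA n (q ++ c :: cs, cnt) (q.length : Int) = ((q ++ [c]) ++ cs, cnt + 1) := by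
          simp only [pvStepA, hget, hc, if_true, hm]
          simp
        rw [hstep, hstop, show (q.length : Int) + 1 = ((q ++ [c]).length : Int) from (elen _).symm,
            ih (q ++ [c]) (cnt + 1)]
        simp only [pvGo, hc, if_true, hm, List.countP_cons, Prod.mk.injEq]
        constructor
        · simp
        · push_cast; ring
    · have hstep :
          pvStepA n (q ++ c :: cs, cnt) (q.length : Int) = ((q ++ [c]) ++ cs, cnt) := by
        simp only [pvStepA, hget, hc]
        simp
      rw [hstep, hstop, show (q.length : Int) + 1 = ((q ++ [c]).length : Int) from (elen _).symm,
          ih (q ++ [c]) cnt]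
      simp only [pvGo, hc, List.countP_cons, Prod.mk.injEq]
      constructor
      · simp
      · simp

theorem pvB_fold (n : Int) (s : List Char) :
    ∀ (q0 q : List Char) (r : Int), q0.length = q.length →
      (PySem.List.enumerate
          ((PySem.List.enumerate s (q.length : Int)).filterMap
            (fun p => if pvIsCons p.2 then some p.1 else none)) r).foldl
          (fun acc ri =>
            if PySem.Int.mod (ri.1 + 1) n = 0 then
              acc.set ri.2.toNat (pvReplB (PySem.List.pyGetD (q0 ++ s) ri.2 ' '))
            else acc)
          (q ++ s)
        = q ++ pvGo n s r := by
  induction s with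
  | nil =>
    intro q0 q r _
    simp [pvGo, PySem.List.enumerate]
  | cons c cs ih =>
    intro q0 q r hlen
    rw [PySem.List.enumerate_cons]
    have hshift : (q.length : Int) + 1 = (((q ++ [c]).length : Int)) := by simp
    by_cases hc : pvIsCons c = true
    · simp only [List.filterMap_cons, hc, if_true, PySem.List.enumerate_cons, List.foldl_cons]
      have hgetc : PySem.List.pyGetD (q0 ++ c :: cs) (q.length : Int) ' ' = c := by
        rw [← hlen, PySem.List.pyGetD_natCast]
        simp [List.getD_eq_getElem?_getD]
      by_cases hm : PySem.Int.mod (r + 1) n = 0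
      · have hset :
            (q ++ c :: cs).set q.length (pvReplB c) = q ++ pvReplB c :: cs := by
          simp
        simp only [hm, if_true, Int.toNat_natCast, hgetc, hset]
        have hih := ih (q0 ++ [c]) (q ++ [pvReplB c]) (r + 1) (by simp [hlen])
        simp only [List.append_assoc, List.singleton_append] at hih ⊢
        push_cast [List.length_append, List.length_cons, List.length_nil] at hih ⊢
        rw [hih]
        simp [pvGo, hc, hm]
      · simp only [hm, if_false]
        have hih := ih (q0 ++ [c]) (q ++ [c]) (r + 1) (by simp [hlen])
        simp only [List.append_assoc, List.singleton_append] at hih ⊢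
        push_cast [List.length_append, List.length_cons, List.length_nil] at hih ⊢
        rw [hih]
        simp [pvGo, hc, hm]
    · simp only [List.filterMap_cons, hc]
      have hih := ih (q0 ++ [c]) (q ++ [c]) r (by simp [hlen])
      simp only [List.append_assoc, List.singleton_append] at hih ⊢
      push_cast [List.length_append, List.length_cons, List.length_nil] at hih ⊢
      rw [hih]
      simp [pvGo, hc]

-- ===== VERDICT (by name: the statement is the Claim_ definition above) =====
theorem solution_spec : Claim_equal_solution := by
  intro message n _ _
  unfold Spec_solution solution solution_alt
  have hA := pvA_fold n message.toList [] 0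
  have hB := pvB_fold n message.toList [] [] 0 rfl
  simp only [List.nil_append, List.length_nil, Nat.cast_zero, zero_add] at hA hB
  rw [hA, hB]
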